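-- pv_equiv track=rewrite | github.com/HIT-ICES/ChainCollab | Experiment/new/exp3/scripts/normalize_traces.py | merge_state_diff
-- ===== SOURCE A (Python) =====
-- from copy import deepcopy
-- from typing import Any, Dict, List, Tuple
--
-- def merge_state_diff(first: Dict[str, List[str]], second: Dict[str, List[str]]) -> Dict[str, List[str]]:
--     merged = deepcopy(first)
--     for element_id, transition in second.items():
--         if element_id in merged:
--             merged[element_id] = [merged[element_id][0], transition[1]]
--         else:
--             merged[element_id] = transition
--     return merged
-- ===== SOURCE B (Python) =====
-- from copy import deepcopy
--
-- def merge_state_diff(first, second):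
--     # Key-driven merge: first compute the ordered union of keys, then map
--     # every key to its merged value in one dict comprehension.
--     def value(k):
--         if k in first:
--             if k in second:
--                 return [deepcopy(first[k][0]), second[k][1]]
--             return deepcopy(first[k])
--         return second[k]
--     return {k: value(k) for k in dict.fromkeys(list(first) + list(second))}
-- ===== Notes on version B (the rewrite author's own statement) =====
-- stated objective: alternative
-- what changed: B is key-driven instead of mutation-driven: it first computes the ordered union of the two key sets (dict.fromkeys on the concatenated key lists) and then builds the result in one dict comprehension mapping each key to its merged value, instead of deepcopying first and imperatively patching it entry by entry while iterating second.
import Mathlib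
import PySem

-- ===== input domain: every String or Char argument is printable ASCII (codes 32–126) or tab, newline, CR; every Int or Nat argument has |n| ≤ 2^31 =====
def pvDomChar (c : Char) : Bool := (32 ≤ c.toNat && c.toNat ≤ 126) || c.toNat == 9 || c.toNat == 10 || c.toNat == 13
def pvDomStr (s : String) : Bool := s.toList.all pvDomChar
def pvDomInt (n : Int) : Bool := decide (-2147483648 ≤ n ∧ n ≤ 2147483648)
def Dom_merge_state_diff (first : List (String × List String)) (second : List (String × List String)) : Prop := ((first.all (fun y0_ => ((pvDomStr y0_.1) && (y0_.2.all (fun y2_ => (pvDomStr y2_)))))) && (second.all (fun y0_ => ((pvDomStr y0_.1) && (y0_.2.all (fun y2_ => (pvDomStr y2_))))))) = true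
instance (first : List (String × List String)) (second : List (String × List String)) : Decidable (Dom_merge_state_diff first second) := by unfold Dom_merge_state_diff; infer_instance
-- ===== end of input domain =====

-- B is key-driven: ordered union of the key sets, then one map from key to merged value, instead of A's deepcopy-then-patch mutation; objective: alternative decomposition, same cost.


-- ===== PORT A =====
-- merged = deepcopy(first); for (k, tr) in second: overwrite shared keys with [merged[k][0], tr[1]], append new ones
def merge_state_diff (first : List (String × List String)) (second : List (String × List String)) : List (String × List String) :=
  (second.foldl
    (fun (merged : PySem.Dict String (List String)) kv =>
      if merged.contains kv.1 then
        merged.insert kv.1 [(PySem.List.pyGet? (merged.getD kv.1 []) 0).getD "", (PySem.List.pyGet? kv.2 1).getD ""]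
      else
        merged.insert kv.1 kv.2)
    (PySem.Dict.mk first)).items

-- ===== PORT B =====
-- ordered union of the key lists (dict.fromkeys = PySem.List.dedup), then one comprehension k ↦ value(k)
def merge_state_diff_alt (first : List (String × List String)) (second : List (String × List String)) : List (String × List String) :=
  (PySem.List.dedup (first.map Prod.fst ++ second.map Prod.fst)).map (fun k =>
    match (PySem.Dict.mk first).get? k with
    | some v =>
      match (PySem.Dict.mk second).get? k with
      | some w => (k, [(PySem.List.pyGet? v 0).getD "", (PySem.List.pyGet? w 1).getD ""])
      | none => (k, v)
    | none => (k, ((PySem.Dict.mk second).get? k).getD []))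

-- ===== PRECONDITION & SPEC =====
-- Pre_ excludes (a) association lists with duplicate keys, which do not represent Python dicts (A still
-- returns on the collapsed dict there, identically to B), and (b) inputs where A raises IndexError:
-- a shared key whose first-value is empty or whose second-value has fewer than two elements.
def Pre_merge_state_diff (first : List (String × List String)) (second : List (String × List String)) : Prop :=
  (first.map Prod.fst).Nodup ∧ (second.map Prod.fst).Nodup ∧
  (∀ kv ∈ first, kv.1 ∈ second.map Prod.fst → kv.2 ≠ []) ∧
  (∀ kv ∈ second, kv.1 ∈ first.map Prod.fst → 2 ≤ kv.2.length)
instance (first : List (String × List String)) (second : List (String × List String)) : Decidable (Pre_merge_state_diff first second) := by unfold Pre_merge_state_diff; infer_instance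
def pvWitness_merge_state_diff : (List (String × List String)) × (List (String × List String)) :=
  ([("a", ["s0", "s1"]), ("b", ["t0"])], [("a", ["u0", "u1"]), ("c", ["v0"])])
def Spec_merge_state_diff (first : List (String × List String)) (second : List (String × List String)) (out : List (String × List String)) : Prop := out = merge_state_diff_alt first second
instance (first : List (String × List String)) (second : List (String × List String)) (out : List (String × List String)) : Decidable (Spec_merge_state_diff first second out) := by unfold Spec_merge_state_diff; infer_instance

-- ===== CLAIM (what is proved, stated in full; the proofs are below) =====
def Claim_equal_merge_state_diff : Prop := ∀ (first : List (String × List String)) (second : List (String × List String)), Dom_merge_state_diff first second → Pre_merge_state_diff first second → Spec_merge_state_diff first second (merge_state_diff first second)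

-- ===== LEMMAS AND PROOFS =====

-- the per-shared-entry combination A performs, parametrised by the second-dict suffix still to be merged
def pvF (s : List (String × List String)) (kv : String × List String) : String × List String :=
  match (PySem.Dict.mk s).get? kv.1 with
  | some w => (kv.1, [(PySem.List.pyGet? kv.2 0).getD "", (PySem.List.pyGet? w 1).getD ""])
  | none => kv

def pvStep (m : PySem.Dict String (List String)) (kv : String × List String) : PySem.Dict String (List String) :=
  if m.contains kv.1 then
    m.insert kv.1 [(PySem.List.pyGet? (m.getD kv.1 []) 0).getD "", (PySem.List.pyGet? kv.2 1).getD ""]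
  else
    m.insert kv.1 kv.2

-- B's per-key value function
def pvVal (first second : List (String × List String)) (k : String) : String × List String :=
  match (PySem.Dict.mk first).get? k with
  | some v =>
    match (PySem.Dict.mk second).get? k with
    | some w => (k, [(PySem.List.pyGet? v 0).getD "", (PySem.List.pyGet? w 1).getD ""])
    | none => (k, v)
  | none => (k, ((PySem.Dict.mk second).get? k).getD [])

-- A's loop, characterised: map over first's items, then the second-only items
lemma pv_main (s : List (String × List String)) :
    ∀ (m : PySem.Dict String (List String)), m.keys.Nodup → (s.map Prod.fst).Nodup →
    (s.foldl pvStep m).items =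
      m.items.map (pvF s) ++ s.filter (fun kv => !(m.contains kv.1)) := by
  induction s with
  | nil =>
    intro m _ _
    have h : pvF [] = id := funext fun kv => rfl
    simp [h]
  | cons kw rest ih =>
    intro m hm hs
    obtain ⟨k, w⟩ := kw
    have hcons := List.nodup_cons.mp (show (k :: rest.map Prod.fst).Nodup by simpa using hs)
    have hk_rest : k ∉ rest.map Prod.fst := hcons.1
    have hrest : (rest.map Prod.fst).Nodup := hcons.2
    have hget_rest_k : (PySem.Dict.mk rest).get? k = none := by
      rw [PySem.Dict.get?_eq_none_iff_not_mem_keys]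
      simpa [PySem.Dict.keys] using hk_rest
    rw [List.foldl_cons]
    by_cases hc : m.contains k = true
    · -- shared key: insert overwrites in place
      have hstep : pvStep m (k, w) =
          m.insert k [(PySem.List.pyGet? (m.getD k []) 0).getD "", (PySem.List.pyGet? w 1).getD ""] := by
        simp [pvStep, hc]
      rw [hstep, ih _ (PySem.Dict.nodup_keys_insert _ _ _ hm) hrest]
      rw [PySem.Dict.items_insert_of_contains
        (d := m) (k := k) (v := [(PySem.List.pyGet? (m.getD k []) 0).getD "", (PySem.List.pyGet? w 1).getD ""]) hc]
      rw [List.map_map]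
      congr 1
      · apply List.map_congr_left
        intro p hp
        obtain ⟨p1, p2⟩ := p
        simp only [Function.comp_apply]
        by_cases hpk : p1 = k
        · subst hpk
          have hval : m.getD p1 [] = p2 := PySem.Dict.getD_of_mem_items m hp hm []
          simp [pvF, PySem.Dict.get?_mk_cons, hget_rest_k, hval]
        · simp [pvF, PySem.Dict.get?_mk_cons, hpk, Ne.symm hpk]
      · rw [List.filter_cons]
        simp only [hc, Bool.not_true, Bool.false_eq_true, if_false]
        apply List.filter_congr
        intro x hx
        rw [PySem.Dict.contains_insert]
        by_cases hxk : x.1 = k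
        · simp [hxk, hc]
        · simp [hxk]
    · -- new key: insert appends
      have hc' : m.contains k = false := by simpa using hc
      have hk_m : k ∉ m.keys := fun hmem => hc ((PySem.Dict.contains_iff_mem_keys m k).mpr hmem)
      have hstep : pvStep m (k, w) = m.insert k w := by simp [pvStep, hc']
      rw [hstep, ih _ (PySem.Dict.nodup_keys_insert _ _ _ hm) hrest]
      rw [PySem.Dict.items_insert_of_not_contains (d := m) (k := k) (v := w) hc']
      rw [List.map_append]
      have hFkw : pvF rest (k, w) = (k, w) := by simp [pvF, hget_rest_k]
      have hmap : m.items.map (pvF rest) = m.items.map (pvF ((k, w) :: rest)) := by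
        apply List.map_congr_left
        intro p hp
        have hpk : p.1 ≠ k := fun h => hk_m (h ▸ PySem.Dict.mem_keys_of_mem_items m hp)
        simp [pvF, PySem.Dict.get?_mk_cons, Ne.symm hpk]
      have hfil : rest.filter (fun kv => !((m.insert k w).contains kv.1))
          = rest.filter (fun kv => !(m.contains kv.1)) := by
        apply List.filter_congr
        intro x hx
        rw [PySem.Dict.contains_insert]
        have hxk : x.1 ≠ k := fun h => hk_rest (h ▸ List.mem_map_of_mem hx)
        simp [hxk]
      rw [hfil, hmap, List.filter_cons]
      simp [hFkw, hc']

-- the ordered key union splits into first's keys then the second-only keys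
lemma pv_dedup_split (fk sk : List String) (hf : fk.Nodup) (hs : sk.Nodup) :
    PySem.List.dedup (fk ++ sk) = fk ++ sk.filter (fun x => !(fk.contains x)) := by
  rw [PySem.List.dedup_eq_ofList, PySem.Set.ofList_append, PySem.Set.update_eq_append_filter]
  rw [PySem.Set.ofList_eq_self_of_nodup fk hf, PySem.Set.ofList_eq_self_of_nodup sk hs]
  simp

lemma pv_bridge (first second : List (String × List String))
    (hf : (first.map Prod.fst).Nodup) (hs : (second.map Prod.fst).Nodup) :
    (second.foldl pvStep (PySem.Dict.mk first)).items =
      (PySem.List.dedup (first.map Prod.fst ++ second.map Prod.fst)).map (pvVal first second) := by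
  have hfk : ((PySem.Dict.mk first).keys).Nodup := by simpa [PySem.Dict.keys] using hf
  have hsk : ((PySem.Dict.mk second).keys).Nodup := by simpa [PySem.Dict.keys] using hs
  rw [pv_main second (PySem.Dict.mk first) hfk hs,
    pv_dedup_split _ _ hf hs, List.map_append, List.filter_map, List.map_map]
  congr 1
  · -- the entries coming from first
    show first.map (pvF second) = first.map (pvVal first second ∘ Prod.fst)
    apply List.map_congr_left
    intro kv hkv
    have h1 : (PySem.Dict.mk first).get? kv.1 = some kv.2 :=
      (PySem.Dict.get?_eq_some_iff_mem_items _ _ _ hfk).mpr hkv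
    simp only [Function.comp_apply, pvF, pvVal, h1]
  · -- the second-only entries
    rw [List.map_map]
    have hfilter : second.filter ((fun x => !((first.map Prod.fst).contains x)) ∘ Prod.fst)
        = second.filter (fun kv => !((PySem.Dict.mk first).contains kv.1)) := by
      apply List.filter_congr
      intro kv _
      by_cases h : kv.1 ∈ first.map Prod.fst
      · have hc : (PySem.Dict.mk first).contains kv.1 = true :=
          (PySem.Dict.contains_iff_mem_keys _ _).mpr (by simpa [PySem.Dict.keys] using h)
        simp [h, hc]
      · have hc : (PySem.Dict.mk first).contains kv.1 = false := by
          cases hcc : (PySem.Dict.mk first).contains kv.1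
          · rfl
          · exact absurd (by simpa [PySem.Dict.keys] using
              (PySem.Dict.contains_iff_mem_keys _ _).mp hcc) h
        simp [h, hc]
    rw [hfilter]
    have : ∀ kv ∈ second.filter (fun kv => !((PySem.Dict.mk first).contains kv.1)),
        (pvVal first second ∘ Prod.fst) kv = kv := by
      intro kv hkv
      have hmem := List.mem_of_mem_filter hkv
      have hnotin : (PySem.Dict.mk first).contains kv.1 = false := by
        have := List.of_mem_filter hkv
        simpa using this
      have h1 : (PySem.Dict.mk first).get? kv.1 = none := by
        rw [PySem.Dict.get?_eq_none_iff_not_mem_keys]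
        intro hk
        rw [(PySem.Dict.contains_iff_mem_keys _ _).mpr hk] at hnotin
        simp at hnotin
      have h2 : (PySem.Dict.mk second).get? kv.1 = some kv.2 :=
        (PySem.Dict.get?_eq_some_iff_mem_items _ _ _ hsk).mpr hmem
      simp [pvVal, h1, h2]
    rw [List.map_congr_left this]
    simp

-- ===== VERDICT (by name: the statement is the Claim_ definition above) =====
theorem merge_state_diff_spec : Claim_equal_merge_state_diff := by
  intro first second _ hpre
  unfold Spec_merge_state_diff merge_state_diff merge_state_diff_alt
  have h := pv_bridge first second hpre.1 hpre.2.1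
  simpa [pvStep, pvVal] using h
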